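-- pv_equiv track=rewrite | github.com/Fr4nc3/code-hints | python/Scientific/sample3/6_4/lists.py | move_front
-- ===== SOURCE A (Python) =====
-- def move_front(list):
--     '''6.4.f'''
--     # move to the front even elements
--     odd_list = []
--     even_list = []
--     for i in range(len(list)):
--         if list[i] % 2 == 0:
--             even_list.append(list[i])
--         else:
--             odd_list.append(list[i])
--
--     return even_list + odd_list
-- ===== SOURCE B (Python) =====
-- def move_front(list):
--     '''6.4.f'''
--     # move even elements to the front: one stable sort by parity key
--     return sorted(list, key=lambda x: x % 2)
-- ===== Notes on version B (the rewrite author's own statement) =====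
-- stated objective: idiomatic
-- what changed: Replaced the two-accumulator partition loop with a single stable sort by the parity key x % 2; stability keeps each group's original order.
import Mathlib
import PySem

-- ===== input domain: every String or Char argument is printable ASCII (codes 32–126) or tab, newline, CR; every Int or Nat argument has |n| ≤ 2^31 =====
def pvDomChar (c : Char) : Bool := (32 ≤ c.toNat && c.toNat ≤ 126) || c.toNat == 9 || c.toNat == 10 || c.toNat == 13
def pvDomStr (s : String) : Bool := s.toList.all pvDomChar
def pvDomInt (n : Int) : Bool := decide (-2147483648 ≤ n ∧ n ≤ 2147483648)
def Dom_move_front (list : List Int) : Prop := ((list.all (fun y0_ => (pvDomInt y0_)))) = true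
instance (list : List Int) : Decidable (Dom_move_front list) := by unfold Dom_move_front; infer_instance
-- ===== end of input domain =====

-- B replaces A's two-accumulator partition loop with one stable sort by the parity key x % 2 (idiomatic; same return value, not faster).
-- ===== PORT A =====
-- Transliteration of A: loop over range(len(list)), appending to odd/even accumulators.
def move_front (list : List Int) : List Int :=
  let p : List Int × List Int :=
    (PySem.List.pyRange 0 (list.length) 1).foldl
      (fun (acc : List Int × List Int) i =>
        if PySem.Int.mod (PySem.List.pyGetD list i 0) 2 = 0 then
          (acc.1, acc.2 ++ [PySem.List.pyGetD list i 0])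
        else
          (acc.1 ++ [PySem.List.pyGetD list i 0], acc.2))
      ([], [])
  p.2 ++ p.1

-- ===== PORT B =====
-- Transliteration of B: one stable sort by the parity key x % 2.
def move_front_alt (list : List Int) : List Int :=
  PySem.List.sorted list (fun x => PySem.Int.mod x 2) false

-- ===== PRECONDITION & SPEC =====
def Spec_move_front (list : List Int) (out : List Int) : Prop := out = move_front_alt list
instance (list : List Int) (out : List Int) : Decidable (Spec_move_front list out) := by unfold Spec_move_front; infer_instance

-- ===== CLAIM (what is proved, stated in full; the proofs are below) =====
def Claim_equal_move_front : Prop := ∀ (list : List Int), Dom_move_front list → Spec_move_front list (move_front list)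

-- ===== LEMMAS AND PROOFS =====

-- Python's % with a positive divisor is Lean's Int.emod.
theorem pv_mod2 (x : Int) : PySem.Int.mod x 2 = x % 2 :=
  PySem.Int.mod_eq_emod_of_pos (by norm_num)

theorem pv_key01 (x : Int) : x % 2 = 0 ∨ x % 2 = 1 := by omega

-- Inserting an even element into (evens ++ odds) lands at the end of the evens.
theorem pv_insert_even (x : Int) (hx : x % 2 = 0) :
    ∀ (E O : List Int), (∀ y ∈ E, y % 2 = 0) → (∀ y ∈ O, y % 2 = 1) →
    PySem.List.insertBy (fun a b => decide (a % 2 < b % 2)) x (E ++ O)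
      = E ++ x :: O := by
  intro E O hE hO
  induction E with
  | nil =>
    cases O with
    | nil => simp [PySem.List.insertBy]
    | cons y t =>
      have hy := hO y (by simp)
      simp only [List.nil_append, PySem.List.insertBy, hx, hy]
      norm_num
  | cons e E' ih =>
    have he := hE e (by simp)
    simp only [List.cons_append, PySem.List.insertBy, hx, he]
    norm_num
    exact ih (fun y hy => hE y (by simp [hy]))

-- Inserting an odd element lands at the very end.
theorem pv_insert_odd (x : Int) (hx : x % 2 = 1) :
    ∀ (L : List Int),
    PySem.List.insertBy (fun a b => decide (a % 2 < b % 2)) x L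
      = L ++ [x] := by
  intro L
  induction L with
  | nil => simp [PySem.List.insertBy]
  | cons y t ih =>
    have hy := pv_key01 y
    have hlt : ¬ (x % 2 < y % 2) := by omega
    simp only [PySem.List.insertBy, hlt, decide_false, Bool.false_eq_true, if_false, ih,
      List.cons_append]

-- The insertion-sort fold keeps the shape evens ++ odds.
theorem pv_sort_partition :
    ∀ (xs E O : List Int), (∀ y ∈ E, y % 2 = 0) → (∀ y ∈ O, y % 2 = 1) →
    xs.foldl (fun acc x =>
        PySem.List.insertBy (fun a b => decide (a % 2 < b % 2)) x acc)
      (E ++ O)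
      = (E ++ xs.filter (fun x => decide (x % 2 = 0)))
        ++ (O ++ xs.filter (fun x => decide (x % 2 = 1))) := by
  intro xs
  induction xs with
  | nil => intro E O _ _; simp
  | cons x t ih =>
    intro E O hE hO
    have hfe : ∀ (l : List Int), List.filter (fun x => decide (x % 2 = 0)) (x :: l)
        = (if x % 2 = 0 then [x] else []) ++ List.filter (fun x => decide (x % 2 = 0)) l := by
      intro l
      rcases pv_key01 x with h | h <;> simp [List.filter_cons, h]
    have hfo : ∀ (l : List Int), List.filter (fun x => decide (x % 2 = 1)) (x :: l)
        = (if x % 2 = 1 then [x] else []) ++ List.filter (fun x => decide (x % 2 = 1)) l := by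
      intro l
      rcases pv_key01 x with h | h <;> simp [List.filter_cons, h]
    rcases pv_key01 x with hx | hx
    · have h1 : PySem.List.insertBy (fun a b => decide (a % 2 < b % 2)) x (E ++ O)
          = (E ++ [x]) ++ O := by
        rw [pv_insert_even x hx E O hE hO]; simp
      have hE' : ∀ y ∈ E ++ [x], y % 2 = 0 := by
        intro y hy; rcases List.mem_append.mp hy with h | h
        · exact hE y h
        · simp at h; subst h; exact hx
      have hx1 : ¬ (x % 2 = 1) := by omega
      rw [List.foldl_cons, h1, ih (E ++ [x]) O hE' hO, hfe t, hfo t]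
      simp [hx, hx1]
    · have h1 : PySem.List.insertBy (fun a b => decide (a % 2 < b % 2)) x (E ++ O)
          = E ++ (O ++ [x]) := by
        rw [pv_insert_odd x hx (E ++ O)]; simp
      have hO' : ∀ y ∈ O ++ [x], y % 2 = 1 := by
        intro y hy; rcases List.mem_append.mp hy with h | h
        · exact hO y h
        · simp at h; subst h; exact hx
      have hx0 : ¬ (x % 2 = 0) := by omega
      rw [List.foldl_cons, h1, ih E (O ++ [x]) hE hO', hfe t, hfo t]
      simp [hx, hx0]

-- B's stable sort is the partition evens ++ odds.
theorem pv_alt_eq_filters (list : List Int) :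
    move_front_alt list
      = list.filter (fun x => decide (x % 2 = 0))
        ++ list.filter (fun x => decide (x % 2 = 1)) := by
  unfold move_front_alt
  rw [PySem.List.sorted_eq_foldl_insertBy]
  simp only [pv_mod2]
  have := pv_sort_partition list [] [] (by simp) (by simp)
  simpa using this

-- A's accumulator pair, characterised.
theorem pv_a_fold (xs : List Int) : ∀ (o e : List Int),
    xs.foldl
      (fun (acc : List Int × List Int) x =>
        if x % 2 = 0 then (acc.1, acc.2 ++ [x]) else (acc.1 ++ [x], acc.2))
      (o, e)
      = (o ++ xs.filter (fun x => decide (x % 2 = 1)),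
         e ++ xs.filter (fun x => decide (x % 2 = 0))) := by
  induction xs with
  | nil => intro o e; simp
  | cons x t ih =>
    intro o e
    simp only [List.foldl_cons]
    rcases pv_key01 x with hx | hx
    · have hx1 : ¬ (x % 2 = 1) := by omega
      have d0 : decide (x % 2 = 0) = true := by simp [hx]
      have d1 : decide (x % 2 = 1) = false := by simp [hx1]
      rw [if_pos hx, ih]
      simp only [List.filter_cons, d0, d1, if_true, Bool.false_eq_true, if_false,
        List.append_assoc, List.singleton_append]
    · have hx0 : ¬ (x % 2 = 0) := by omega
      have d0 : decide (x % 2 = 0) = false := by simp [hx0]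
      have d1 : decide (x % 2 = 1) = true := by simp [hx]
      rw [if_neg hx0, ih]
      simp only [List.filter_cons, d0, d1, if_true, Bool.false_eq_true, if_false,
        List.append_assoc, List.singleton_append]

-- ===== VERDICT (by name: the statement is the Claim_ definition above) =====
theorem move_front_spec : Claim_equal_move_front := by
  intro list _
  unfold Spec_move_front move_front
  rw [pv_alt_eq_filters]
  have hlen : ((list.length : Int)) = PySem.List.len list := by
    simp [PySem.List.len_eq]
  simp only [hlen, pv_mod2]
  rw [PySem.List.foldl_pyRange_zero_pyGetD
    (f := fun (acc : List Int × List Int) x =>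
      if x % 2 = 0 then (acc.1, acc.2 ++ [x]) else (acc.1 ++ [x], acc.2))
    (xs := list) (d := 0) (init := (([] : List Int), ([] : List Int)))]
  rw [pv_a_fold list [] []]
  simp
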